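-- pv_equiv track=rewrite | github.com/SophistryDude/Sin_City_Travels | scripts/scrape_pois.py | infer_restaurant_features
-- ===== SOURCE A (Python) =====
-- def infer_restaurant_features(name, cuisine_raw=''):
--     """Generate feature tags for a restaurant."""
--     features = ["dining"]
--     combined = (name + ' ' + cuisine_raw).lower()
--     if 'quickbites' in combined:
--         features.append("quick_service")
--     if any(w in combined for w in ['steak', 'seafood', 'french', 'italian']):
--         features.append("sit_down_dining")
--     if 'buffet' in combined:
--         features.append("buffet")
--         features.append("all_you_can_eat")
--     if 'sushi' in combined:
--         features.append("sushi_bar")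
--     return features
-- ===== SOURCE B (Python) =====
-- _KEYWORD_TAG = [
--     ('quickbites', 'quick_service'),
--     ('steak', 'sit_down_dining'),
--     ('seafood', 'sit_down_dining'),
--     ('french', 'sit_down_dining'),
--     ('italian', 'sit_down_dining'),
--     ('buffet', 'buffet'),
--     ('sushi', 'sushi_bar'),
-- ]
--
-- _TAG_EMIT = [
--     ('quick_service', ['quick_service']),
--     ('sit_down_dining', ['sit_down_dining']),
--     ('buffet', ['buffet', 'all_you_can_eat']),
--     ('sushi_bar', ['sushi_bar']),
-- ]
--
-- def infer_restaurant_features(name, cuisine_raw=''):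
--     """Generate feature tags for a restaurant.
--
--     Single scan over the combined text: at each position, record which
--     feature tags have a keyword starting there (a multi-pattern matcher
--     collecting a set of matched tags); then emit the matched tags in
--     canonical order.  The set is only queried for membership, never
--     iterated, so no hash order leaks into the result.
--     """
--     combined = (name + ' ' + cuisine_raw).lower()
--     hit = set()
--     for i in range(len(combined)):
--         for kw, tag in _KEYWORD_TAG:
--             if combined.startswith(kw, i):
--                 hit.add(tag)
--     features = ['dining']
--     for tag, emit in _TAG_EMIT:
--         if tag in hit:
--             features.extend(emit)
--     return features
-- ===== Notes on version B (the rewrite author's own statement) =====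
-- stated objective: alternative
-- what changed: B replaces A's per-keyword substring tests with a position-driven multi-pattern scan: one pass over the combined text collects the SET of matched feature tags (checking which keywords start at each index), and a second stage emits the matched tags in canonical order.
import Mathlib
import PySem

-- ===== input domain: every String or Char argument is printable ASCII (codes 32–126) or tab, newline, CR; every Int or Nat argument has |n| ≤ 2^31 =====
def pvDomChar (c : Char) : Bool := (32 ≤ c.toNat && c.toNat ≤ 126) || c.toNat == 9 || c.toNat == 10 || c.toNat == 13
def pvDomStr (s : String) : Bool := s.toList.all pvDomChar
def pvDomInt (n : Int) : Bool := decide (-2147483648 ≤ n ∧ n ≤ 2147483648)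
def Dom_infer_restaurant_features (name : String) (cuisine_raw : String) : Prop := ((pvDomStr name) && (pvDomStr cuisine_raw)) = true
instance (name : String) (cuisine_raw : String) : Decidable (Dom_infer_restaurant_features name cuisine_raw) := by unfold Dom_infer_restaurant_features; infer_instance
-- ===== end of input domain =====

-- B replaces A's per-keyword substring tests by one position-driven scan collecting a set of matched tags, then a canonical-order emission stage (alternative algorithm, same cost).

-- ===== PORT A =====
def infer_restaurant_features (name : String) (cuisine_raw : String) : List String :=
  let features := ["dining"]
  let combined := PySem.Str.lower (name ++ " " ++ cuisine_raw)
  let features := if PySem.Str.isIn "quickbites" combined then features ++ ["quick_service"] else features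
  let features := if ["steak", "seafood", "french", "italian"].any (fun w => PySem.Str.isIn w combined) then features ++ ["sit_down_dining"] else features
  let features := if PySem.Str.isIn "buffet" combined then (features ++ ["buffet"]) ++ ["all_you_can_eat"] else features
  let features := if PySem.Str.isIn "sushi" combined then features ++ ["sushi_bar"] else features
  features

-- ===== PORT B =====
def pvKwTag : List (List Char × String) :=
  [("quickbites".toList, "quick_service"),
   ("steak".toList, "sit_down_dining"),
   ("seafood".toList, "sit_down_dining"),
   ("french".toList, "sit_down_dining"),
   ("italian".toList, "sit_down_dining"),
   ("buffet".toList, "buffet"),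
   ("sushi".toList, "sushi_bar")]

def pvTagEmit : List (String × List String) :=
  [("quick_service", ["quick_service"]),
   ("sit_down_dining", ["sit_down_dining"]),
   ("buffet", ["buffet", "all_you_can_eat"]),
   ("sushi_bar", ["sushi_bar"])]

-- the scan loop of Source B: for i in range(len(cl)): for kw, tag in _KEYWORD_TAG: if cl startswith kw at i: hit.add(tag)
-- combined.startswith(kw, i) with 0 ≤ i < len(combined) is exactly Chars.startswith on (cl.drop i) — exact on this index range
def pvHit (cl : List Char) : PySem.Set String :=
  (List.range cl.length).foldl
    (fun h i => pvKwTag.foldl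
      (fun h p => if PySem.Chars.startswith (cl.drop i) p.1 then PySem.Set.add h p.2 else h) h)
    PySem.Set.empty

def infer_restaurant_features_alt (name : String) (cuisine_raw : String) : List String :=
  let combined := PySem.Str.lower (name ++ " " ++ cuisine_raw)
  let hit := pvHit combined.toList
  pvTagEmit.foldl (fun fs p => if PySem.Set.contains hit p.1 then fs ++ p.2 else fs) ["dining"]

-- ===== PRECONDITION & SPEC =====
def Spec_infer_restaurant_features (name : String) (cuisine_raw : String) (out : List String) : Prop := out = infer_restaurant_features_alt name cuisine_raw
instance (name : String) (cuisine_raw : String) (out : List String) : Decidable (Spec_infer_restaurant_features name cuisine_raw out) := by unfold Spec_infer_restaurant_features; infer_instance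

-- ===== CLAIM =====
def Claim_equal_infer_restaurant_features : Prop := ∀ (name : String) (cuisine_raw : String), Dom_infer_restaurant_features name cuisine_raw → Spec_infer_restaurant_features name cuisine_raw (infer_restaurant_features name cuisine_raw)

-- ===== LEMMAS AND PROOFS =====

-- membership through a fold that conditionally adds: generic one-layer lemma
theorem pv_mem_foldl_set {α : Type} (t : String) (Q : α → Prop)
    (F : PySem.Set String → α → PySem.Set String)
    (hF : ∀ h a, (t ∈ F h a ↔ t ∈ h ∨ Q a)) :
    ∀ (l : List α) (h : PySem.Set String), (t ∈ l.foldl F h ↔ t ∈ h ∨ ∃ a ∈ l, Q a) := by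
  intro l
  induction l with
  | nil => intro h; simp
  | cons a l ih =>
    intro h
    simp only [List.foldl_cons, ih, hF, List.mem_cons]
    constructor
    · rintro (( h1 | h1) | ⟨b, hb, hq⟩)
      · exact Or.inl h1
      · exact Or.inr ⟨a, Or.inl rfl, h1⟩
      · exact Or.inr ⟨b, Or.inr hb, hq⟩
    · rintro (h1 | ⟨b, (rfl | hb), hq⟩)
      · exact Or.inl (Or.inl h1)
      · exact Or.inl (Or.inr hq)
      · exact Or.inr ⟨b, hb, hq⟩

theorem pv_mem_if_add (t x : String) (h : PySem.Set String) (c : Bool) :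
    (t ∈ (if c then PySem.Set.add h x else h)) ↔ t ∈ h ∨ (c = true ∧ x = t) := by
  cases c <;> simp [PySem.Set.mem_add, or_comm, eq_comm]

theorem pv_mem_pvHit (cl : List Char) (t : String) :
    t ∈ pvHit cl ↔ ∃ i ∈ List.range cl.length, ∃ p ∈ pvKwTag,
      PySem.Chars.startswith (cl.drop i) p.1 = true ∧ p.2 = t := by
  unfold pvHit
  rw [pv_mem_foldl_set t
    (fun i => ∃ p ∈ pvKwTag, PySem.Chars.startswith (cl.drop i) p.1 = true ∧ p.2 = t)
    _ ?_ _ PySem.Set.empty]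
  · simp [PySem.Set.empty]
  · intro h i
    rw [pv_mem_foldl_set t
      (fun p => PySem.Chars.startswith (cl.drop i) p.1 = true ∧ p.2 = t)
      _ ?_ pvKwTag h]
    intro h' p
    exact pv_mem_if_add t p.2 h' _

-- a keyword occurs at some scanned position iff it is a substring (keywords are nonempty)
theorem pv_range_prefix_iff (s kw : List Char) (hkw : kw ≠ []) :
    (∃ i ∈ List.range s.length, PySem.Chars.startswith (s.drop i) kw = true) ↔
      PySem.Chars.isIn kw s = true := by
  simp only [PySem.Chars.startswith_iff, List.mem_range]
  rw [← PySem.Chars.exists_prefix_drop_iff_isIn]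
  constructor
  · rintro ⟨i, _, hp⟩; exact ⟨i, hp⟩
  · rintro ⟨j, hp⟩
    refine ⟨j, ?_, hp⟩
    by_contra hj
    have : s.drop j = [] := List.drop_eq_nil_of_le (by omega)
    rw [this, List.prefix_nil] at hp
    exact hkw hp

theorem pv_hit_tag (cl : List Char) (t : String) :
    PySem.Set.contains (pvHit cl) t =
      (pvKwTag.filter (fun p => p.2 == t)).any
        (fun p => PySem.Chars.isIn p.1 cl) := by
  rw [Bool.eq_iff_iff, PySem.Set.contains_iff, pv_mem_pvHit, List.any_eq_true]
  constructor
  · rintro ⟨i, hi, p, hp, hs, rfl⟩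
    refine ⟨p, List.mem_filter.mpr ⟨hp, by simp⟩, ?_⟩
    have hne : p.1 ≠ [] := by
      revert hp; unfold pvKwTag; intro hp
      fin_cases hp <;> decide
    exact (pv_range_prefix_iff cl p.1 hne).mp ⟨i, hi, hs⟩
  · rintro ⟨p, hp, hin⟩
    obtain ⟨hp, ht⟩ := List.mem_filter.mp hp
    have hne : p.1 ≠ [] := by
      revert hp; unfold pvKwTag; intro hp
      fin_cases hp <;> decide
    obtain ⟨i, hi, hs⟩ := (pv_range_prefix_iff cl p.1 hne).mpr hin
    exact ⟨i, hi, p, hp, hs, by simpa using ht⟩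

-- per-tag characterisation of the scan's hit set, specialised to the four emitted tags
theorem pv_hit_quick (cl : List Char) :
    PySem.Set.contains (pvHit cl) "quick_service" = PySem.Chars.isIn "quickbites".toList cl := by
  rw [pv_hit_tag]; simp [pvKwTag]

theorem pv_hit_sit (cl : List Char) :
    PySem.Set.contains (pvHit cl) "sit_down_dining" =
      (PySem.Chars.isIn "steak".toList cl || PySem.Chars.isIn "seafood".toList cl ||
       PySem.Chars.isIn "french".toList cl || PySem.Chars.isIn "italian".toList cl) := by
  rw [pv_hit_tag]; simp [pvKwTag, Bool.or_assoc]

theorem pv_hit_buffet (cl : List Char) :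
    PySem.Set.contains (pvHit cl) "buffet" = PySem.Chars.isIn "buffet".toList cl := by
  rw [pv_hit_tag]; simp [pvKwTag]

theorem pv_hit_sushi (cl : List Char) :
    PySem.Set.contains (pvHit cl) "sushi_bar" = PySem.Chars.isIn "sushi".toList cl := by
  rw [pv_hit_tag]; simp [pvKwTag]

-- ===== VERDICT =====
theorem infer_restaurant_features_spec : Claim_equal_infer_restaurant_features := by
  intro name cuisine_raw _
  unfold Spec_infer_restaurant_features infer_restaurant_features infer_restaurant_features_alt
  simp only [pvTagEmit, List.foldl_cons, List.foldl_nil,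
    pv_hit_quick, pv_hit_sit, pv_hit_buffet, pv_hit_sushi,
    PySem.Str.isIn_eq, PySem.Str.toList_lower,
    List.any_cons, List.any_nil, Bool.or_false, Bool.or_assoc]
  split_ifs <;> rfl
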